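-- pv_equiv track=rewrite | github.com/mateovlz/studying-dsa | python/minimalHeaviestSetA.py | minimalHeaviestSetA
-- ===== SOURCE A (Python) =====
-- def minimalHeaviestSetA(arr):
--     # Step 1: Sort the array in descending order
--     sorted_arr = sorted(arr, reverse=True)
--
--     # Step 2: Initialize the subsets and their sums
--     A = []
--     sum_A = 0
--     total_sum = sum(arr)
--
--     # Step 3: Greedily add items to A until its sum exceeds half of the total sum
--     for weight in sorted_arr:
--         A.append(weight)
--         sum_A += weight
--         if sum_A > total_sum - sum_A:
--             break
--
--     # Step 4: Return A sorted in increasing order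
--     return sorted(A)
-- ===== SOURCE B (Python) =====
-- def minimalHeaviestSetA(arr):
--     # Leftist max-heap selection: never fully sorts the input; pops the largest
--     # elements one by one until their sum exceeds the rest, then reverses.
--     def merge(a, b):
--         if a is None:
--             return b
--         if b is None:
--             return a
--         if a[1] < b[1]:
--             a, b = b, a
--         l = a[2]
--         m = merge(a[3], b)
--         rl = l[0] if l is not None else 0
--         rm = m[0] if m is not None else 0
--         if rm <= rl:
--             return (rm + 1, a[1], l, m)
--         return (rl + 1, a[1], m, l)
--
--     h = None
--     for w in arr:
--         h = merge((1, w, None, None), h)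
--     total = sum(arr)
--     s = 0
--     taken = []
--     while h is not None:
--         w = h[1]
--         h = merge(h[2], h[3])
--         taken.append(w)
--         s += w
--         if s > total - s:
--             break
--     taken.reverse()
--     return taken
-- ===== Notes on version B (the rewrite author's own statement) =====
-- stated objective: alternative
-- what changed: B replaces A's sort-then-greedy-then-resort with a leftist max-heap: it builds a heap in one pass, pops the largest elements until their running sum exceeds the rest, and reverses the popped (descending) list, never fully sorting the input.
import Mathlib
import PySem

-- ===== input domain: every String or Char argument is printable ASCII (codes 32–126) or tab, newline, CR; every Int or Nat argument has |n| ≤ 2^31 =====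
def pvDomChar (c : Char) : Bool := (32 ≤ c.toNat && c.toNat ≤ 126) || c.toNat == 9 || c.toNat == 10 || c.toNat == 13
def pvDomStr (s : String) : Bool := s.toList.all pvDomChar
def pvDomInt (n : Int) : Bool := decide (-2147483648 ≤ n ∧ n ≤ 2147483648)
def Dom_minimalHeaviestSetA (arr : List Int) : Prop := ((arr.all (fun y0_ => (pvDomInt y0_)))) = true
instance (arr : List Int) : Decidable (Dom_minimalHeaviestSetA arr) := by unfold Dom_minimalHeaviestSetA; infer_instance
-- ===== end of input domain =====

-- B replaces A's sort-then-greedy-then-resort with a leftist max-heap: it builds a heap in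
-- one pass, pops the largest elements until their sum exceeds the rest, and reverses the
-- popped (descending) list; the input is never fully sorted. Objective: alternative.

-- ===== PORT A =====
-- A's loop: append weights of the descending-sorted list until sum_A > total_sum - sum_A.
def pvLoopA : List Int → List Int → Int → Int → List Int
  | [], A, _, _ => A
  | w :: rest, A, sumA, total =>
      let A' := A ++ [w]
      let sumA' := sumA + w
      if sumA' > total - sumA' then A' else pvLoopA rest A' sumA' total

def minimalHeaviestSetA (arr : List Int) : List Int :=
  let sorted_arr := PySem.List.sorted arr (fun x => x) true
  let A := pvLoopA sorted_arr [] 0 arr.sum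
  PySem.List.sorted A (fun x => x) false

-- ===== PORT B =====
-- B's heap node (rank, value, left, right); Python's None is pvHeap.nil.
inductive pvHeap : Type where
  | nil : pvHeap
  | node : Nat → Int → pvHeap → pvHeap → pvHeap
deriving DecidableEq, Repr

def pvHeap.size : pvHeap → Nat
  | .nil => 0
  | .node _ _ l t => 1 + l.size + t.size

-- rank access: `x[0] if x is not None else 0`
def pvRank : pvHeap → Nat
  | .nil => 0
  | .node r _ _ _ => r

-- transliteration of B's recursive `merge` (the `a, b = b, a` swap is the first if-branch);
-- the fuel argument is only a structural-termination guard: a.size + b.size fuel always suffices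
def pvMergeF : Nat → pvHeap → pvHeap → pvHeap
  | _, .nil, b => b
  | _, a, .nil => a
  | 0, _, b => b
  | fuel + 1, .node ra va la ta, .node rb vb lb tb =>
      if va < vb then
        let l := lb
        let m := pvMergeF fuel tb (.node ra va la ta)
        if pvRank m ≤ pvRank l then .node (pvRank m + 1) vb l m
        else .node (pvRank l + 1) vb m l
      else
        let l := la
        let m := pvMergeF fuel ta (.node rb vb lb tb)
        if pvRank m ≤ pvRank l then .node (pvRank m + 1) va l m
        else .node (pvRank l + 1) va m l

def pvMerge (a b : pvHeap) : pvHeap := pvMergeF (a.size + b.size) a b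

-- `for w in arr: h = merge((1, w, None, None), h)`
def pvBuild (arr : List Int) : pvHeap :=
  arr.foldl (fun h w => pvMerge (.node 1 w .nil .nil) h) .nil

-- B's `while h is not None` loop; fuel (= heap size at the call) is again only a guard
def pvLoopBF : Nat → pvHeap → Int → Int → List Int → List Int
  | _, .nil, _, _, taken => taken
  | 0, _, _, _, taken => taken
  | fuel + 1, .node _ v l t, s, total, taken =>
      let taken' := taken ++ [v]
      let s' := s + v
      if s' > total - s' then taken' else pvLoopBF fuel (pvMerge l t) s' total taken'

def minimalHeaviestSetA_alt (arr : List Int) : List Int :=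
  let h := pvBuild arr
  (pvLoopBF h.size h 0 arr.sum []).reverse

-- ===== PRECONDITION & SPEC =====
def Spec_minimalHeaviestSetA (arr : List Int) (out : List Int) : Prop := out = minimalHeaviestSetA_alt arr
instance (arr : List Int) (out : List Int) : Decidable (Spec_minimalHeaviestSetA arr out) := by unfold Spec_minimalHeaviestSetA; infer_instance

-- ===== CLAIM (what is proved, stated in full; the proofs are below) =====
def Claim_equal_minimalHeaviestSetA : Prop := ∀ (arr : List Int), Dom_minimalHeaviestSetA arr → Spec_minimalHeaviestSetA arr (minimalHeaviestSetA arr)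

-- ===== LEMMAS AND PROOFS =====

-- elements of a heap
def pvElems : pvHeap → List Int
  | .nil => []
  | .node _ v l t => v :: (pvElems l ++ pvElems t)

-- the max-heap invariant
def pvHP : pvHeap → Prop
  | .nil => True
  | .node _ v l t => pvHP l ∧ pvHP t ∧ (∀ x ∈ pvElems l, x ≤ v) ∧ (∀ x ∈ pvElems t, x ≤ v)

theorem pvMergeF_elems_ms (fuel : Nat) :
    ∀ (a b : pvHeap), a.size + b.size ≤ fuel →
      (pvElems (pvMergeF fuel a b) : Multiset Int)
        = (pvElems a : Multiset Int) + (pvElems b : Multiset Int) := by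
  induction fuel with
  | zero =>
      intro a b hf
      cases a <;> cases b <;> simp_all [pvHeap.size, pvMergeF, pvElems]
  | succ fuel ih =>
      intro a b hf
      cases a with
      | nil => simp [pvMergeF, pvElems]
      | node ra va la ta =>
        cases b with
        | nil => simp [pvMergeF, pvElems]
        | node rb vb lb tb =>
          simp only [pvHeap.size] at hf
          simp only [pvMergeF]
          split
          · have h1 := ih tb (.node ra va la ta) (by simp only [pvHeap.size]; omega)
            split <;>
              (simp only [pvElems, ← Multiset.cons_coe, ← Multiset.coe_add] at h1 ⊢;
               rw [h1]; simp only [← Multiset.singleton_add]; abel)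
          · have h1 := ih ta (.node rb vb lb tb) (by simp only [pvHeap.size]; omega)
            split <;>
              (simp only [pvElems, ← Multiset.cons_coe, ← Multiset.coe_add] at h1 ⊢;
               rw [h1]; simp only [← Multiset.singleton_add]; abel)

theorem pvElems_merge_ms (a b : pvHeap) :
    (pvElems (pvMerge a b) : Multiset Int) = (pvElems a : Multiset Int) + (pvElems b : Multiset Int) :=
  pvMergeF_elems_ms (a.size + b.size) a b (le_refl _)

theorem pvMergeF_HP (fuel : Nat) :
    ∀ (a b : pvHeap), a.size + b.size ≤ fuel → pvHP a → pvHP b → pvHP (pvMergeF fuel a b) := by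
  induction fuel with
  | zero =>
      intro a b hf ha hb
      cases a <;> cases b <;> simp_all [pvHeap.size, pvMergeF, pvHP]
  | succ fuel ih =>
      intro a b hf ha hb
      cases a with
      | nil => simpa [pvMergeF] using hb
      | node ra va la ta =>
        cases b with
        | nil => simpa [pvMergeF] using ha
        | node rb vb lb tb =>
          simp only [pvHeap.size] at hf
          simp only [pvMergeF]
          split
          · rename_i hlt
            obtain ⟨hbl, hbt, hblb, hbtb⟩ := hb
            have hfm : pvHeap.size tb + pvHeap.size (.node ra va la ta) ≤ fuel := by
              simp only [pvHeap.size]; omega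
            have hm : pvHP (pvMergeF fuel tb (.node ra va la ta)) := ih tb _ hfm hbt ha
            have hbound : ∀ x ∈ pvElems (pvMergeF fuel tb (.node ra va la ta)), x ≤ vb := by
              intro x hx
              have hx' : x ∈ pvElems tb ∨ x ∈ pvElems (pvHeap.node ra va la ta) := by
                have := pvMergeF_elems_ms fuel tb (.node ra va la ta) hfm
                rw [← Multiset.mem_coe, this, Multiset.mem_add, Multiset.mem_coe,
                  Multiset.mem_coe] at hx
                exact hx
              rcases hx' with h1 | h1
              · exact hbtb x h1
              · obtain ⟨hal, hat, hala, hata⟩ := ha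
                simp only [pvElems, List.mem_cons, List.mem_append] at h1
                rcases h1 with rfl | h1 | h1
                · exact le_of_lt hlt
                · exact le_trans (hala x h1) (le_of_lt hlt)
                · exact le_trans (hata x h1) (le_of_lt hlt)
            split
            · exact ⟨hbl, hm, hblb, hbound⟩
            · exact ⟨hm, hbl, hbound, hblb⟩
          · rename_i hlt
            obtain ⟨hal, hat, hala, hata⟩ := ha
            have hvb : vb ≤ va := le_of_not_gt hlt
            have hfm : pvHeap.size ta + pvHeap.size (.node rb vb lb tb) ≤ fuel := by
              simp only [pvHeap.size]; omega
            have hm : pvHP (pvMergeF fuel ta (.node rb vb lb tb)) := ih ta _ hfm hat hb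
            have hbound : ∀ x ∈ pvElems (pvMergeF fuel ta (.node rb vb lb tb)), x ≤ va := by
              intro x hx
              have hx' : x ∈ pvElems ta ∨ x ∈ pvElems (pvHeap.node rb vb lb tb) := by
                have := pvMergeF_elems_ms fuel ta (.node rb vb lb tb) hfm
                rw [← Multiset.mem_coe, this, Multiset.mem_add, Multiset.mem_coe,
                  Multiset.mem_coe] at hx
                exact hx
              rcases hx' with h1 | h1
              · exact hata x h1
              · obtain ⟨hbl, hbt, hblb, hbtb⟩ := hb
                simp only [pvElems, List.mem_cons, List.mem_append] at h1
                rcases h1 with rfl | h1 | h1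
                · exact hvb
                · exact le_trans (hblb x h1) hvb
                · exact le_trans (hbtb x h1) hvb
            split
            · exact ⟨hal, hm, hala, hbound⟩
            · exact ⟨hm, hal, hbound, hala⟩

theorem pvHP_merge (a b : pvHeap) (ha : pvHP a) (hb : pvHP b) : pvHP (pvMerge a b) :=
  pvMergeF_HP (a.size + b.size) a b (le_refl _) ha hb

theorem pvElems_build_ms (arr : List Int) :
    (pvElems (pvBuild arr) : Multiset Int) = (arr : Multiset Int) := by
  have key : ∀ (l : List Int) (h : pvHeap),
      (pvElems (l.foldl (fun h w => pvMerge (.node 1 w .nil .nil) h) h) : Multiset Int)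
        = (pvElems h : Multiset Int) + (l : Multiset Int) := by
    intro l
    induction l with
    | nil => intro h; simp
    | cons w ws ih =>
        intro h
        simp only [List.foldl_cons]
        rw [ih, pvElems_merge_ms]
        simp only [pvElems, ← Multiset.cons_coe, List.append_nil, ← Multiset.singleton_add]
        abel
  simpa [pvElems] using key arr .nil

theorem pvElems_build_perm (arr : List Int) : (pvElems (pvBuild arr)).Perm arr :=
  Multiset.coe_eq_coe.mp (pvElems_build_ms arr)

theorem pvHP_build (arr : List Int) : pvHP (pvBuild arr) := by
  have key : ∀ (l : List Int) (h : pvHeap), pvHP h →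
      pvHP (l.foldl (fun h w => pvMerge (.node 1 w .nil .nil) h) h) := by
    intro l
    induction l with
    | nil => intro h hh; simpa
    | cons w ws ih =>
        intro h hh
        simp only [List.foldl_cons]
        exact ih _ (pvHP_merge _ _ (by simp [pvHP, pvElems]) hh)
  exact key arr .nil trivial

theorem pvMerge_size (a b : pvHeap) : (pvMerge a b).size = a.size + b.size := by
  have hlen : (pvElems (pvMerge a b)).length = (pvElems a ++ pvElems b).length := by
    have hperm : (pvElems (pvMerge a b)).Perm (pvElems a ++ pvElems b) := by
      apply Multiset.coe_eq_coe.mp; rw [pvElems_merge_ms, Multiset.coe_add]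
    exact hperm.length_eq
  have hsz : ∀ h : pvHeap, (pvElems h).length = h.size := by
    intro h
    induction h with
    | nil => rfl
    | node r v l t ihl iht => simp [pvElems, pvHeap.size, ihl, iht]; omega
  rw [← hsz, ← hsz, ← hsz, hlen, List.length_append]

-- descending sort is the reverse of the ascending sort
theorem pv_asc_rev (xs : List Int) :
    PySem.List.sorted xs (fun x => x) true = (PySem.List.sorted xs (fun x => x) false).reverse := by
  have h1 : PySem.List.sorted xs (fun x => x) false = (PySem.List.sorted xs (fun x => x) true).reverse := by
    apply PySem.List.sorted_id_eq_of_perm_of_pairwise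
    · exact (List.reverse_perm _).trans (PySem.List.sorted_perm _ _ _)
    · exact (List.pairwise_reverse).mpr (PySem.List.sorted_pairwise_rev _ _)
  rw [h1, List.reverse_reverse]

theorem pv_desc_perm_congr (xs ys : List Int) (h : xs.Perm ys) :
    PySem.List.sorted xs (fun x => x) true = PySem.List.sorted ys (fun x => x) true := by
  rw [pv_asc_rev, pv_asc_rev,
    PySem.List.sorted_eq_sorted_of_perm xs ys (fun x => x) (fun a b hab => hab) h]

-- head of the descending sort is the max, tail sorts the rest
theorem pv_desc_cons (xs : List Int) (v : Int) (hm : v ∈ xs) (hmax : ∀ x ∈ xs, x ≤ v) :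
    PySem.List.sorted xs (fun x => x) true = v :: PySem.List.sorted (xs.erase v) (fun x => x) true := by
  have hasc : PySem.List.sorted xs (fun x => x) false
      = PySem.List.sorted (xs.erase v) (fun x => x) false ++ [v] := by
    apply PySem.List.sorted_id_eq_of_perm_of_pairwise
    · exact (((PySem.List.sorted_perm _ _ _).append_right [v]).trans
        (List.perm_append_singleton v (xs.erase v))).trans (List.perm_cons_erase hm).symm
    · rw [List.pairwise_append]
      refine ⟨PySem.List.sorted_pairwise _ _, List.pairwise_singleton _ _, ?_⟩
      intro a ha b hb
      rw [List.mem_singleton] at hb; subst hb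
      exact hmax a (List.mem_of_mem_erase ((PySem.List.mem_sorted _ _ _ _).mp ha))
  rw [pv_asc_rev, hasc, List.reverse_append, List.reverse_singleton, List.singleton_append,
    ← pv_asc_rev]

theorem pvLoopBF_eq_loopA (fuel : Nat) :
    ∀ (h : pvHeap), h.size ≤ fuel → ∀ (s total : Int) (acc : List Int), pvHP h →
      pvLoopBF fuel h s total acc
        = pvLoopA (PySem.List.sorted (pvElems h) (fun x => x) true) acc s total := by
  induction fuel with
  | zero =>
      intro h hf s total acc _
      cases h with
      | nil => rfl
      | node r v l t => simp [pvHeap.size] at hf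
  | succ fuel ih =>
      intro h hf s total acc hp
      cases h with
      | nil => rfl
      | node r v l t =>
        have hcons : PySem.List.sorted (pvElems (pvHeap.node r v l t)) (fun x => x) true
            = v :: PySem.List.sorted (pvElems (pvMerge l t)) (fun x => x) true := by
          rw [pv_desc_cons (pvElems (pvHeap.node r v l t)) v (by simp [pvElems])
            (by
              intro x hx
              simp only [pvElems, List.mem_cons, List.mem_append] at hx
              rcases hx with rfl | hx | hx
              · exact le_refl x
              · exact hp.2.2.1 x hx
              · exact hp.2.2.2 x hx)]
          simp only [pvElems, List.erase_cons_head]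
          rw [pv_desc_perm_congr _ _ (Multiset.coe_eq_coe.mp (pvElems_merge_ms l t)).symm]
        rw [hcons]
        simp only [pvLoopBF, pvLoopA]
        split
        · rfl
        · exact ih (pvMerge l t)
            (by simp only [pvMerge_size]; simp only [pvHeap.size] at hf; omega)
            _ _ _ (pvHP_merge l t hp.1 hp.2.1)

-- A's loop takes a prefix of its list
def pvK : List Int → Int → Int → Nat
  | [], _, _ => 0
  | w :: rest, run, total =>
      if run + w > total - (run + w) then 1 else 1 + pvK rest (run + w) total

theorem pvLoopA_eq_take (l : List Int) (A : List Int) (run total : Int) :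
    pvLoopA l A run total = A ++ l.take (pvK l run total) := by
  induction l generalizing A run with
  | nil => simp [pvLoopA, pvK]
  | cons w rest ih =>
      simp only [pvLoopA, pvK]
      split_ifs with h
      · simp
      · rw [ih, Nat.add_comm, List.take_succ_cons]; simp

-- ===== VERDICT (by name: the statement is the Claim_ definition above) =====
theorem minimalHeaviestSetA_spec : Claim_equal_minimalHeaviestSetA := by
  intro arr _
  unfold Spec_minimalHeaviestSetA minimalHeaviestSetA minimalHeaviestSetA_alt
  show PySem.List.sorted (pvLoopA (PySem.List.sorted arr (fun x => x) true) [] 0 arr.sum)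
        (fun x => x) false
      = (pvLoopBF (pvBuild arr).size (pvBuild arr) 0 arr.sum []).reverse
  rw [pvLoopBF_eq_loopA (pvBuild arr).size (pvBuild arr) (le_refl _) _ _ _ (pvHP_build arr),
    pv_desc_perm_congr _ _ (pvElems_build_perm arr)]
  set l := PySem.List.sorted arr (fun x => x) true with hl
  rw [pvLoopA_eq_take, List.nil_append]
  apply PySem.List.sorted_id_eq_of_perm_of_pairwise
  · exact (List.reverse_perm _)
  · exact (List.pairwise_reverse).mpr
      (List.Pairwise.take (PySem.List.sorted_pairwise_rev _ _))
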